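-- pv_equiv track=rewrite | github.com/JIINSUNG/CODINGTEST | 2556-disconnect-path-in-a-binary-matrix-by-at-most-one-flip/2556-disconnect-path-in-a-binary-matrix-by-at-most-one-flip.py | isPossibleToCutPath
-- ===== SOURCE A (Python) =====
-- from typing import List
--
-- def isPossibleToCutPath(grid: List[List[int]]) -> bool:
--     n, m = len(grid), len(grid[0])
--
--     def dfs(x, y):
--         if x == n-1 and y == m-1:
--             return True
--
--         grid[x][y] = 0
--
--         for dx, dy in [(1, 0), (0, 1)]:
--             nx, ny = x + dx, y + dy
--             if 0 <= nx < n and 0 <= ny < m and grid[nx][ny]: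
--                 if dfs(nx, ny):
--                     return True
--
--         return False
--
--     # 애초에 방문 할 수 없다면
--     if not dfs(0, 0):
--         return True
--
--     grid[0][0] = 1
--     grid[n-1][m-1] = 1
--
--     return not dfs(0, 0)
-- ===== SOURCE B (Python) =====
-- from typing import List
--
--
-- def isPossibleToCutPath(grid: List[List[int]]) -> bool:
--     # Iterative DFS with an explicit stack instead of A's recursion.
--     # Mutates grid exactly like A (zeroes every visited non-target cell,
--     # then restores the two corners before the second pass).
--     n, m = len(grid), len(grid[0])
--
--     def reach():
--         if n == 1 and m == 1:
--             return True
--         grid[0][0] = 0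
--         stack = []
--         if 1 < m:
--             stack.append((0, 1))
--         if 1 < n:
--             stack.append((1, 0))
--         while stack:
--             x, y = stack.pop()
--             if grid[x][y] == 0:
--                 continue
--             if x == n - 1 and y == m - 1:
--                 return True
--             grid[x][y] = 0
--             if y + 1 < m:
--                 stack.append((x, y + 1))
--             if x + 1 < n:
--                 stack.append((x + 1, y))
--         return False
--
--     if not reach():
--         return True
--
--     grid[0][0] = 1
--     grid[n - 1][m - 1] = 1
--
--     return not reach()
-- ===== Notes on version B (the rewrite author's own statement) =====
-- stated objective: alternative
-- what changed: A's recursive DFS helper is replaced by an iterative DFS over an explicit stack of coordinates (staleness re-checked at pop time), with the same down-before-right exploration order, the same in-place zeroing of visited cells and the same corner restoration between the two passes.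
-- outside the precondition, e.g. on isPossibleToCutPath([[1, 0], [0]]): A returns True, B returns True
import Mathlib
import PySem

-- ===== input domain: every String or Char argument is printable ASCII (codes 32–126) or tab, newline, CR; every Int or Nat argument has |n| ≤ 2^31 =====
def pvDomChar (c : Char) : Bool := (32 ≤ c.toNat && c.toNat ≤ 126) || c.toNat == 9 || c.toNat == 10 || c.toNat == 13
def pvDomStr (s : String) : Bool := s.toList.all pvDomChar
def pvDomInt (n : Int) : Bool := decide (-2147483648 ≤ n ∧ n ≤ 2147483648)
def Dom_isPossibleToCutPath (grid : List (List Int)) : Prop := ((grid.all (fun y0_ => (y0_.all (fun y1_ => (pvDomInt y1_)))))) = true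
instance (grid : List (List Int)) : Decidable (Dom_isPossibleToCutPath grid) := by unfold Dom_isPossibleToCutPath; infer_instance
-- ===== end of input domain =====

-- B replaces A's recursive DFS helper by an iterative DFS with an explicit stack
-- (same visit order, and in Python the same in-place mutation of grid as A);
-- the equivalence proved here is about the return value, with the grid state
-- threaded explicitly through both ports.

-- ===== PORT A =====
-- grid cells are read/written at nonnegative in-range indices only (Python's
-- 0 <= nx check is trivially true), so coordinates are ported as Nat and
-- cell access via getD; exact on inputs satisfying Pre_.
def pvGetCell (g : List (List Int)) (x y : Nat) : Int := (g.getD x []).getD y 0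

def pvSetCell (g : List (List Int)) (x y : Nat) (v : Int) : List (List Int) :=
  g.set x ((g.getD x []).set y v)

-- A's dfs: the for-loop over [(1,0),(0,1)] is unrolled; the mutated grid is
-- threaded as part of the result.
def pvDfsA (n m : Nat) (g : List (List Int)) (x y : Nat) : Bool × List (List Int) :=
  if x = n - 1 ∧ y = m - 1 then (true, g)
  else
    let g1 := pvSetCell g x y 0
    let r1 := if h : x + 1 < n ∧ y < m ∧ pvGetCell g1 (x + 1) y ≠ 0
              then pvDfsA n m g1 (x + 1) y else (false, g1)
    if r1.1 then (true, r1.2)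
    else if h : x < n ∧ y + 1 < m ∧ pvGetCell r1.2 x (y + 1) ≠ 0
         then pvDfsA n m r1.2 x (y + 1) else (false, r1.2)
termination_by n + m - (x + y)
decreasing_by
  · obtain ⟨h1, h2, -⟩ := h; omega
  · obtain ⟨h1, h2, -⟩ := h; omega

def isPossibleToCutPath (grid : List (List Int)) : Bool :=
  let n := grid.length
  let m := (grid.getD 0 []).length
  match pvDfsA n m grid 0 0 with
  | (false, _) => true
  | (true, g) =>
    !(pvDfsA n m (pvSetCell (pvSetCell g 0 0 1) (n - 1) (m - 1) 1) 0 0).1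

-- ===== PORT B =====
-- termination helper for the while loop (count of nonzero cells drops when a
-- nonzero cell is zeroed)
theorem pvCpSetZeroLt (r : List Int) (y : Nat) (h : r.getD y 0 ≠ 0) :
    (r.set y 0).countP (fun v => v != 0) < r.countP (fun v => v != 0) := by
  induction r generalizing y with
  | nil => simp at h
  | cons a t ih =>
    cases y with
    | zero =>
      simp only [List.getD_cons_zero] at h
      simp [h]
    | succ y =>
      simp only [List.getD_cons_succ] at h
      have := ih y h
      simp only [List.set_cons_succ, List.countP_cons]
      omega

theorem pvNzSetZeroLt (g : List (List Int)) (x y : Nat) (h : pvGetCell g x y ≠ 0) :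
    ((pvSetCell g x y 0).map (fun r => r.countP (fun v => v != 0))).sum
      < (g.map (fun r => r.countP (fun v => v != 0))).sum := by
  induction g generalizing x with
  | nil => simp [pvGetCell] at h
  | cons a t ih =>
    cases x with
    | zero =>
      simp only [pvGetCell, List.getD_cons_zero] at h
      simp only [pvSetCell, List.getD_cons_zero, List.set_cons_zero, List.map_cons,
        List.sum_cons]
      have := pvCpSetZeroLt a y h
      omega
    | succ x =>
      simp only [pvGetCell, List.getD_cons_succ] at h
      have := ih x h
      simp only [pvSetCell] at this
      simp only [pvSetCell, List.getD_cons_succ, List.set_cons_succ, List.map_cons,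
        List.sum_cons]
      omega

-- the while loop over the explicit stack; grid threaded as state.
def pvLoopB (n m : Nat) (stack : List (Nat × Nat)) (g : List (List Int)) :
    Bool × List (List Int) :=
  match stack with
  | [] => (false, g)
  | (x, y) :: rest =>
    if h : pvGetCell g x y = 0 then pvLoopB n m rest g
    else if x = n - 1 ∧ y = m - 1 then (true, g)
    else
      let g1 := pvSetCell g x y 0
      let s1 := if y + 1 < m then (x, y + 1) :: rest else rest
      let s2 := if x + 1 < n then (x + 1, y) :: s1 else s1
      pvLoopB n m s2 g1
termination_by 2 * ((g.map (fun r => r.countP (fun v => v != 0))).sum) + stack.length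
decreasing_by
  · simp only [List.length_cons]; omega
  · have hlt := pvNzSetZeroLt g x y h
    split_ifs <;> simp only [List.length_cons] <;> omega

def pvReachB (n m : Nat) (g : List (List Int)) : Bool × List (List Int) :=
  if n = 1 ∧ m = 1 then (true, g)
  else
    let g1 := pvSetCell g 0 0 0
    let s1 : List (Nat × Nat) := if 1 < m then [(0, 1)] else []
    let s2 : List (Nat × Nat) := if 1 < n then (1, 0) :: s1 else s1
    pvLoopB n m s2 g1

def isPossibleToCutPath_alt (grid : List (List Int)) : Bool :=
  let n := grid.length
  let m := (grid.getD 0 []).length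
  match pvReachB n m grid with
  | (false, _) => true
  | (true, g) =>
    !(pvReachB n m (pvSetCell (pvSetCell g 0 0 1) (n - 1) (m - 1) 1)).1

-- ===== PRECONDITION & SPEC =====
-- Pre_ excludes only inputs on which Python A can hit an IndexError: the empty
-- grid, an empty first row, and grids with a row shorter than the first row
-- (A crashes on such a row whenever the DFS reaches it; on the few such grids
-- the DFS never reaches the short row A returns normally, e.g. [[1,0],[0]] → True,
-- and B returns the same True there).
def Pre_isPossibleToCutPath (grid : List (List Int)) : Prop :=
  grid ≠ [] ∧ 0 < (grid.getD 0 []).length ∧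
    ∀ row ∈ grid, (grid.getD 0 []).length ≤ row.length
instance (grid : List (List Int)) : Decidable (Pre_isPossibleToCutPath grid) := by
  unfold Pre_isPossibleToCutPath; infer_instance

def pvWitness_isPossibleToCutPath : List (List Int) := [[1, 1], [0, 1]]

def Spec_isPossibleToCutPath (grid : List (List Int)) (out : Bool) : Prop :=
  out = isPossibleToCutPath_alt grid
instance (grid : List (List Int)) (out : Bool) :
    Decidable (Spec_isPossibleToCutPath grid out) := by
  unfold Spec_isPossibleToCutPath; infer_instance

-- ===== CLAIM (what is proved, stated in full; the proofs are below) =====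
def Claim_equal_isPossibleToCutPath : Prop :=
  ∀ (grid : List (List Int)), Dom_isPossibleToCutPath grid →
    Pre_isPossibleToCutPath grid →
    Spec_isPossibleToCutPath grid (isPossibleToCutPath grid)

-- ===== LEMMAS AND PROOFS =====

theorem pvLstep (n m x y : Nat) (rest : List (Nat × Nat)) (g : List (List Int))
    (hx : x < n) (hy : y < m) (hnt : ¬(x = n - 1 ∧ y = m - 1)) :
    pvLoopB n m
      (if x + 1 < n
       then (x + 1, y) :: (if y + 1 < m then (x, y + 1) :: rest else rest)
       else (if y + 1 < m then (x, y + 1) :: rest else rest))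
      (pvSetCell g x y 0)
      = (let r := pvDfsA n m g x y
         if r.1 then r else pvLoopB n m rest r.2) := by
  have hg2 : ∀ g2 : List (List Int),
      pvLoopB n m (if y + 1 < m then (x, y + 1) :: rest else rest) g2
      = (let r2 := if x < n ∧ y + 1 < m ∧ pvGetCell g2 x (y + 1) ≠ 0
                   then pvDfsA n m g2 x (y + 1) else (false, g2)
         if r2.1 then r2 else pvLoopB n m rest r2.2) := by
    intro g2
    by_cases hy1 : y + 1 < m
    · simp only [if_pos hy1]
      rw [pvLoopB]
      by_cases hz : pvGetCell g2 x (y + 1) = 0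
      · simp [hz]
      · by_cases ht : x = n - 1 ∧ y + 1 = m - 1
        · obtain ⟨ht1, ht2⟩ := ht
          rw [pvDfsA]
          simp only [ht1, ht2] at hz
          simp [ht1, ht2, hz, show 0 < n by omega, show 0 < m by omega]
        · have hrec := pvLstep n m x (y + 1) rest g2 hx hy1 ht
          simp only [if_neg ht, hrec]
          simp [hz, hx, hy1]
    · simp [hy1]
  by_cases hx1 : x + 1 < n
  · simp only [if_pos hx1]
    rw [pvLoopB]
    by_cases hz : pvGetCell (pvSetCell g x y 0) (x + 1) y = 0
    · rw [pvDfsA]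
      simp [hnt, hz, hg2]
    · by_cases ht : x + 1 = n - 1 ∧ y = m - 1
      · have hinner : pvDfsA n m (pvSetCell g x y 0) (x + 1) y
            = (true, pvSetCell g x y 0) := by
          rw [pvDfsA]; simp [ht]
        have hc1 : x + 1 < n ∧ y < m ∧ pvGetCell (pvSetCell g x y 0) (x + 1) y ≠ 0 :=
          ⟨hx1, hy, hz⟩
        rw [pvDfsA]
        simp only [if_pos ht, if_neg hnt, dif_pos hc1, hinner]
        simp [hz]
      · have hrec := pvLstep n m (x + 1) y
          (if y + 1 < m then (x, y + 1) :: rest else rest) (pvSetCell g x y 0)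
          hx1 hy ht
        rw [pvDfsA]
        simp only [if_neg ht, hrec, if_neg hnt]
        cases hr' : pvDfsA n m (pvSetCell g x y 0) (x + 1) y with
        | mk b g' =>
          cases b
          · simp [hx1, hy, hz, hg2 g']
          · simp [hx1, hy, hz]
  · simp only [if_neg hx1]
    rw [pvDfsA]
    simp [hnt, hx1, hg2]
termination_by n + m - (x + y)
decreasing_by all_goals omega
theorem pvReach_eq (n m : Nat) (g : List (List Int)) (hn : 1 ≤ n) (hm : 1 ≤ m) :
    pvReachB n m g = pvDfsA n m g 0 0 := by
  rw [pvReachB]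
  by_cases h1 : n = 1 ∧ m = 1
  · rw [pvDfsA]; simp [h1]
  · have hnt : ¬((0 : Nat) = n - 1 ∧ (0 : Nat) = m - 1) := by omega
    have hst := pvLstep n m 0 0 ([]) g hn hm hnt
    norm_num at hst
    simp only [if_neg h1]
    rw [hst]
    cases hr : pvDfsA n m g 0 0 with
    | mk b g' => cases b <;> simp [pvLoopB]

-- ===== VERDICT (by name: the statement is the Claim_ definition above) =====
theorem isPossibleToCutPath_spec : Claim_equal_isPossibleToCutPath := by
  intro grid hdom hpre
  obtain ⟨hne, hm, -⟩ := hpre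
  have hn : 1 ≤ grid.length := List.length_pos_of_ne_nil hne
  have hR : ∀ g' : List (List Int),
      pvReachB grid.length (grid.getD 0 []).length g'
        = pvDfsA grid.length (grid.getD 0 []).length g' 0 0 :=
    fun g' => pvReach_eq _ _ g' hn hm
  unfold Spec_isPossibleToCutPath isPossibleToCutPath isPossibleToCutPath_alt
  simp only [hR]
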